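-- pv_equiv track=rewrite | github.com/lam2lam/quad_tbl_comp | analyze.py | compute_group_of_4_cost
-- ===== SOURCE A (Python) =====
-- import math
-- from typing import List, Tuple, Optional
--
-- def bit_cost(values: List[int]) -> int:
--     """Compute bits required to store a list of signed integers."""
--     if not values:
--         return 0
--     max_abs = max(abs(v) for v in values)
--     if max_abs == 0:
--         return 1
--     return math.ceil(math.log2(max_abs + 1))
--
-- def compute_group_of_4_cost(column: List[int], seg_sizes: List[int]) -> int:
--     """
--     Compute cost for group-of-4 algorithm.
--     Per group of 4: store full[0], diff[1], dod[2], dod[3]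
--     Within each segment, compute max bit-width for each category.
--     """
--     total_cost = 0
--
--     for seg_size in seg_sizes:
--         for seg_start in range(0, len(column), seg_size):
--             seg_end = min(seg_start + seg_size, len(column))
--             segment = column[seg_start:seg_end]
--
--             # Collect all values for each category in this segment
--             anchors = []
--             diffs1 = []
--             dods2 = []
--             dods3 = []
--
--             # Process in groups of 4
--             for g in range(0, len(segment), 4):
--                 group = segment[g : g + 4]
--                 if len(group) == 0:
--                     continue
--
--                 # Anchor: full value
--                 anchors.append(group[0])
--
--                 if len(group) >= 2:
--                     # Diff for index 1
--                     diff1 = group[1] - group[0]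
--                     diffs1.append(diff1)
--
--                 if len(group) >= 3:
--                     # Diff-of-diff for index 2
--                     d2 = group[2] - group[1]
--                     d1 = group[1] - group[0]
--                     dod2 = d2 - d1
--                     dods2.append(dod2)
--
--                 if len(group) == 4:
--                     # Diff-of-diff for index 3
--                     d3 = group[3] - group[1]
--                     d1 = group[1] - group[0]
--                     dod3 = d3 - d1
--                     dods3.append(dod3)
--
--             # Compute cost for this segment
--             if anchors:
--                 anchor_bits = bit_cost(anchors) * len(anchors)
--                 total_cost += anchor_bits
--             if diffs1:
--                 diff_bits = bit_cost(diffs1) * len(diffs1)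
--                 total_cost += diff_bits
--             if dods2:
--                 dod2_bits = bit_cost(dods2) * len(dods2)
--                 total_cost += dod2_bits
--             if dods3:
--                 dod3_bits = bit_cost(dods3) * len(dods3)
--                 total_cost += dod3_bits
--
--     return total_cost
-- ===== SOURCE B (Python) =====
-- def compute_group_of_4_cost(column, seg_sizes):
--     """Streaming re-implementation: one pass per segment carrying the last
--     three values and a position-in-group counter; per category keep only a
--     running max of absolute values and a count (no lists, no group slicing)."""
--     n = len(column)
--     total = 0
--     for s in seg_sizes:
--         if s <= 0:
--             # a non-positive segment size covers no segments
--             continue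
--         for start in range(0, n, s):
--             end = start + s
--             if end > n:
--                 end = n
--             j = 0            # position within the current group of 4
--             p1 = p2 = p3 = 0  # last, second-last, third-last value seen
--             m0 = m1 = m2 = m3 = 0  # running max |value| per category
--             c0 = c1 = c2 = c3 = 0  # counts per category
--             for i in range(start, end):
--                 x = column[i]
--                 if j == 0:
--                     v = x
--                     a = -v if v < 0 else v
--                     if a > m0:
--                         m0 = a
--                     c0 += 1
--                 elif j == 1:
--                     v = x - p1
--                     a = -v if v < 0 else v
--                     if a > m1:
--                         m1 = a
--                     c1 += 1
--                 elif j == 2: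
--                     v = (x - p1) - (p1 - p2)
--                     a = -v if v < 0 else v
--                     if a > m2:
--                         m2 = a
--                     c2 += 1
--                 else:
--                     v = (x - p2) - (p2 - p3)
--                     a = -v if v < 0 else v
--                     if a > m3:
--                         m3 = a
--                     c3 += 1
--                 p3, p2, p1 = p2, p1, x
--                 j = (j + 1) % 4
--             for m, c in ((m0, c0), (m1, c1), (m2, c2), (m3, c3)):
--                 if c:
--                     total += (1 if m == 0 else m.bit_length()) * c
--     return total
-- ===== Notes on version B (the rewrite author's own statement) =====
-- stated objective: alternative
-- what changed: Replaces the per-segment group-of-4 slicing, the four category lists and the list-rescanning bit_cost helper with a single streaming pass per segment that carries the last three values and a position-in-group counter, keeping only a running max-absolute-value and a count per category; the bit width comes from int.bit_length instead of building a list and taking ceil(log2(max+1)).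
import Mathlib
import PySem

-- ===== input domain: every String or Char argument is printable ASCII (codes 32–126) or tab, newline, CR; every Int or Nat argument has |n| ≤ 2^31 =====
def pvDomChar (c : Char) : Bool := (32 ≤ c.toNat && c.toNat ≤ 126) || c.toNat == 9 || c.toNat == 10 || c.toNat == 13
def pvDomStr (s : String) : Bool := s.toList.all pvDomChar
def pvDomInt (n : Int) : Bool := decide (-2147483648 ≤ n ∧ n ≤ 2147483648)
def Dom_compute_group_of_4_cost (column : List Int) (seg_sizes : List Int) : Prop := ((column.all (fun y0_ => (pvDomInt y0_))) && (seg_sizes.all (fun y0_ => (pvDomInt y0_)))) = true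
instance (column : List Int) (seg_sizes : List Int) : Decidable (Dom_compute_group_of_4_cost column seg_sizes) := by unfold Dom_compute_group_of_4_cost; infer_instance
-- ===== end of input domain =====

-- B replaces A's per-segment group slicing + four category lists + list-rescanning bit_cost
-- by one streaming pass per segment keeping a running max-abs and a count per category
-- (an alternative decomposition of the same O(S*n) computation).

-- ===== PORT A =====

-- math.ceil(math.log2(max_abs + 1)) is ported as Nat.clog 2 (max_abs + 1): exact here because
-- max_abs + 1 ≤ 2^33 + 1 on the stated domain, where the float log2 never rounds across an integer.
def bit_cost (values : List Int) : Int :=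
  if values = [] then 0
  else
    let max_abs := (PySem.List.max? (values.map (fun v => |v|)) (fun x => x)).getD 0
    if max_abs = 0 then 1
    else Int.ofNat (Nat.clog 2 (max_abs + 1).toNat)

-- body of A's 'for g in range(0, len(segment), 4)' loop
def pvAStepGroup (segment : List Int)
    (st : List Int × List Int × List Int × List Int) (g : Int) :
    List Int × List Int × List Int × List Int :=
  let group := PySem.List.slice segment (some g) (some (g + 4))
  if PySem.List.len group = 0 then st
  else
    let st := (st.1 ++ [PySem.List.pyGetD group 0 0], st.2.1, st.2.2.1, st.2.2.2)
    let st := if 2 ≤ PySem.List.len group then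
        let diff1 := PySem.List.pyGetD group 1 0 - PySem.List.pyGetD group 0 0
        (st.1, st.2.1 ++ [diff1], st.2.2.1, st.2.2.2)
      else st
    let st := if 3 ≤ PySem.List.len group then
        let d2 := PySem.List.pyGetD group 2 0 - PySem.List.pyGetD group 1 0
        let d1 := PySem.List.pyGetD group 1 0 - PySem.List.pyGetD group 0 0
        (st.1, st.2.1, st.2.2.1 ++ [d2 - d1], st.2.2.2)
      else st
    let st := if PySem.List.len group = 4 then
        let d3 := PySem.List.pyGetD group 3 0 - PySem.List.pyGetD group 1 0
        let d1 := PySem.List.pyGetD group 1 0 - PySem.List.pyGetD group 0 0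
        (st.1, st.2.1, st.2.2.1, st.2.2.2 ++ [d3 - d1])
      else st
    st

-- body of A's 'for seg_start in range(0, len(column), seg_size)' loop
def pvASeg (column : List Int) (seg_size : Int) (total : Int) (seg_start : Int) : Int :=
  let seg_end := min (seg_start + seg_size) (PySem.List.len column)
  let segment := PySem.List.slice column (some seg_start) (some seg_end)
  let st := (PySem.List.pyRange 0 (PySem.List.len segment) 4).foldl
      (pvAStepGroup segment) ([], [], [], [])
  let total := if st.1 ≠ [] then total + bit_cost st.1 * PySem.List.len st.1 else total
  let total := if st.2.1 ≠ [] then total + bit_cost st.2.1 * PySem.List.len st.2.1 else total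
  let total := if st.2.2.1 ≠ [] then total + bit_cost st.2.2.1 * PySem.List.len st.2.2.1 else total
  let total := if st.2.2.2 ≠ [] then total + bit_cost st.2.2.2 * PySem.List.len st.2.2.2 else total
  total

def pvASize (column : List Int) (total : Int) (seg_size : Int) : Int :=
  (PySem.List.pyRange 0 (PySem.List.len column) seg_size).foldl (pvASeg column seg_size) total

def compute_group_of_4_cost (column : List Int) (seg_sizes : List Int) : Int :=
  seg_sizes.foldl (pvASize column) 0

-- ===== PORT B =====

-- B's per-segment loop state: position in group, last three values, running max-abs and counts
structure PvB where
  j : Int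
  p1 : Int
  p2 : Int
  p3 : Int
  m0 : Int
  m1 : Int
  m2 : Int
  m3 : Int
  c0 : Int
  c1 : Int
  c2 : Int
  c3 : Int
  deriving Repr, DecidableEq

-- body of B's 'for i in range(start, end)' loop (x = column[i] supplied by the caller)
def pvBStep (st : PvB) (x : Int) : PvB :=
  let st' :=
    if st.j = 0 then
      let v := x
      let a := if v < 0 then -v else v
      { st with m0 := if a > st.m0 then a else st.m0, c0 := st.c0 + 1 }
    else if st.j = 1 then
      let v := x - st.p1
      let a := if v < 0 then -v else v
      { st with m1 := if a > st.m1 then a else st.m1, c1 := st.c1 + 1 }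
    else if st.j = 2 then
      let v := (x - st.p1) - (st.p1 - st.p2)
      let a := if v < 0 then -v else v
      { st with m2 := if a > st.m2 then a else st.m2, c2 := st.c2 + 1 }
    else
      let v := (x - st.p2) - (st.p2 - st.p3)
      let a := if v < 0 then -v else v
      { st with m3 := if a > st.m3 then a else st.m3, c3 := st.c3 + 1 }
  { st' with p3 := st'.p2, p2 := st'.p1, p1 := x, j := PySem.Int.mod (st'.j + 1) 4 }

-- B's closing 'for m, c in ((m0,c0),...)' tally
def pvBTally (total : Int) (mc : Int × Int) : Int :=
  if mc.2 ≠ 0 then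
    total + (if mc.1 = 0 then 1 else Int.ofNat (PySem.Int.bitLength mc.1)) * mc.2
  else total

-- body of B's 'for start in range(0, n, s)' loop
def pvBSeg (column : List Int) (s : Int) (total : Int) (start : Int) : Int :=
  let e := start + s
  let e := if e > PySem.List.len column then PySem.List.len column else e
  let st := (PySem.List.pyRange start e 1).foldl
      (fun st i => pvBStep st (PySem.List.pyGetD column i 0))
      ⟨0, 0, 0, 0, 0, 0, 0, 0, 0, 0, 0, 0⟩
  [(st.m0, st.c0), (st.m1, st.c1), (st.m2, st.c2), (st.m3, st.c3)].foldl pvBTally total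

def pvBSize (column : List Int) (total : Int) (s : Int) : Int :=
  if s ≤ 0 then total
  else (PySem.List.pyRange 0 (PySem.List.len column) s).foldl (pvBSeg column s) total

def compute_group_of_4_cost_alt (column : List Int) (seg_sizes : List Int) : Int :=
  seg_sizes.foldl (pvBSize column) 0

-- ===== PRECONDITION & SPEC =====
-- Pre_ excludes only inputs on which A raises: a segment size 0 makes range(0, n, 0) raise ValueError.
def Pre_compute_group_of_4_cost (column : List Int) (seg_sizes : List Int) : Prop :=
  ∀ s ∈ seg_sizes, s ≠ 0
instance (column : List Int) (seg_sizes : List Int) : Decidable (Pre_compute_group_of_4_cost column seg_sizes) := by unfold Pre_compute_group_of_4_cost; infer_instance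

def pvWitness_compute_group_of_4_cost : List Int × List Int := ([3, 1, 4, 1, 5, 9, 2, 6], [3, 4, -2])

def Spec_compute_group_of_4_cost (column : List Int) (seg_sizes : List Int) (out : Int) : Prop := out = compute_group_of_4_cost_alt column seg_sizes
instance (column : List Int) (seg_sizes : List Int) (out : Int) : Decidable (Spec_compute_group_of_4_cost column seg_sizes out) := by unfold Spec_compute_group_of_4_cost; infer_instance

-- ===== CLAIM (what is proved, stated in full; the proofs are below) =====
def Claim_equal_compute_group_of_4_cost : Prop := ∀ (column : List Int) (seg_sizes : List Int), Dom_compute_group_of_4_cost column seg_sizes → Pre_compute_group_of_4_cost column seg_sizes → Spec_compute_group_of_4_cost column seg_sizes (compute_group_of_4_cost column seg_sizes)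

-- ===== LEMMAS AND PROOFS =====

-- the four category lists A builds for one segment, described by 4-chunk recursion
def pvCats : List Int → List Int × List Int × List Int × List Int
  | [] => ([], [], [], [])
  | [a] => ([a], [], [], [])
  | [a, b] => ([a], [b - a], [], [])
  | [a, b, c] => ([a], [b - a], [(c - b) - (b - a)], [])
  | a :: b :: c :: d :: t =>
    let r := pvCats t
    (a :: r.1, (b - a) :: r.2.1, ((c - b) - (b - a)) :: r.2.2.1, ((d - b) - (b - a)) :: r.2.2.2)

-- B's running max-abs fold
def pvAmax (m : Int) (l : List Int) : Int :=
  l.foldl (fun m v => let a := if v < 0 then -v else v; if a > m then a else m) m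

lemma pvClog_eq_bitLength (m : Int) (hm : 0 < m) :
    Nat.clog 2 (m + 1).toNat = PySem.Int.bitLength m := by
  have h1 : m.natAbs < 2 ^ PySem.Int.bitLength m := PySem.Int.lt_two_pow_bitLength m
  have h2 : 2 ^ (PySem.Int.bitLength m - 1) ≤ m.natAbs := PySem.Int.two_pow_bitLength_le m (by omega)
  have hbl : 1 ≤ PySem.Int.bitLength m := by
    by_contra h
    have h0 : PySem.Int.bitLength m = 0 := by omega
    rw [h0] at h1; simp at h1; omega
  have hn : (m + 1).toNat = m.natAbs + 1 := by omega
  rw [hn]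
  have hle : Nat.clog 2 (m.natAbs + 1) ≤ PySem.Int.bitLength m := by
    rw [Nat.clog_le_iff_le_pow (by norm_num)]; omega
  have hge : PySem.Int.bitLength m - 1 < Nat.clog 2 (m.natAbs + 1) := by
    rw [Nat.lt_clog_iff_pow_lt (by norm_num)]; omega
  omega

lemma pvAmax_eq_max (m : Int) (l : List Int) :
    pvAmax m l = l.foldl (fun m v => max m |v|) m := by
  unfold pvAmax
  apply PySem.List.foldl_congr_mem
  intro acc x _
  dsimp only
  rcases lt_or_ge x 0 with h | h
  · rw [abs_of_neg h]; split_ifs <;> omega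
  · rw [abs_of_nonneg h]; split_ifs <;> omega

lemma pvCat_cost (l : List Int) (total : Int) :
    (if l ≠ [] then total + bit_cost l * (l.length : Int) else total)
      = pvBTally total (pvAmax 0 l, (l.length : Int)) := by
  cases l with
  | nil => simp [pvBTally]
  | cons y t =>
    have hm : pvAmax 0 (y :: t) = List.foldl max |y| (t.map (fun v => |v|)) := by
      rw [pvAmax_eq_max]
      simp only [List.foldl_cons, max_eq_right (abs_nonneg y)]
      rw [List.foldl_map]
    have hmnn : 0 ≤ pvAmax 0 (y :: t) := by
      rw [hm]
      exact le_trans (abs_nonneg y) (PySem.List.le_foldl_max _ _).1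
    have hbc : bit_cost (y :: t)
        = if pvAmax 0 (y :: t) = 0 then 1 else Int.ofNat (PySem.Int.bitLength (pvAmax 0 (y :: t))) := by
      simp only [bit_cost, if_neg (show ¬(y :: t = []) by simp), List.map_cons,
        PySem.List.max?_id_cons, Option.getD_some, ← hm]
      by_cases h0 : pvAmax 0 (y :: t) = 0
      · rw [if_pos h0, if_pos h0]
      · rw [if_neg h0, if_neg h0, pvClog_eq_bitLength _ (by omega)]
    rw [if_pos (by simp), hbc]
    simp only [pvBTally]
    rw [if_pos (show ((pvAmax 0 (y :: t), (((y :: t).length : Int))).2 ≠ 0) by dsimp only; simp; omega)]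

lemma pvRange4_nil (L : Int) (hL : L ≤ 0) : PySem.List.pyRange 0 L 4 = [] := by
  simp [PySem.List.pyRange]; omega

lemma pvRange4_cons (L : Int) (hL : 0 < L) :
    PySem.List.pyRange 0 L 4 = 0 :: (PySem.List.pyRange 0 (L - 4) 4).map (· + 4) := by
  rw [PySem.List.pyRange_of_pos _ _ (by norm_num : (0:Int) < 4),
      PySem.List.pyRange_of_pos _ _ (by norm_num : (0:Int) < 4)]
  have d1 := Int.mul_ediv_add_emod (L + 3) 4
  have r1 : 0 ≤ (L + 3) % 4 := Int.emod_nonneg _ (by norm_num)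
  have r1' : (L + 3) % 4 < 4 := Int.emod_lt_of_pos _ (by norm_num)
  have d2 := Int.mul_ediv_add_emod (L - 1) 4
  have r2 : 0 ≤ (L - 1) % 4 := Int.emod_nonneg _ (by norm_num)
  have r2' : (L - 1) % 4 < 4 := Int.emod_lt_of_pos _ (by norm_num)
  have hc : ((L - 0 + 4 - 1) / 4).toNat
      = (if (0:Int) < L - 4 then ((L - 4 - 0 + 4 - 1) / 4).toNat else 0) + 1 := by
    by_cases h : (0:Int) < L - 4 <;> simp only [h, if_true, if_false] <;> omega
  simp only [if_pos hL, hc, List.range_succ_eq_map, List.map_cons, List.map_map]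
  refine List.cons_eq_cons.mpr ⟨by simp, ?_⟩
  apply List.map_congr_left; intro k _; simp [Function.comp]; ring

lemma pvSlice_shift (a b c d : Int) (t : List Int) (g : Int) (hg : 0 ≤ g) :
    PySem.List.slice (a :: b :: c :: d :: t) (some (g + 4)) (some (g + 4 + 4))
      = PySem.List.slice t (some g) (some (g + 4)) := by
  rw [PySem.List.slice_toNat _ (by omega) (by omega), PySem.List.slice_toNat _ hg (by omega)]
  have h1 : (g + 4).toNat = g.toNat + 4 := by omega
  have h2 : (g + 4 + 4).toNat = (g + 4).toNat + 4 := by omega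
  rw [h2, h1]
  simp [List.drop_succ_cons]

lemma pvA_inner (L : List Int) (as d1 d2 d3 : List Int) :
    (PySem.List.pyRange 0 (PySem.List.len L) 4).foldl (pvAStepGroup L) (as, d1, d2, d3)
      = (as ++ (pvCats L).1, d1 ++ (pvCats L).2.1, d2 ++ (pvCats L).2.2.1, d3 ++ (pvCats L).2.2.2) := by
  induction L using pvCats.induct generalizing as d1 d2 d3 with
  | case1 =>
    rw [PySem.List.len_eq]
    simp [pvRange4_nil 0 le_rfl, pvCats]
  | case2 a =>
    rw [PySem.List.len_eq, show (([a] : List Int).length : Int) = 1 by simp,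
        pvRange4_cons 1 (by norm_num), pvRange4_nil (1 - 4) (by norm_num)]
    have hgrp : PySem.List.slice ([a] : List Int) (some 0) (some (0 + 4)) = [a] := by
      rw [PySem.List.slice_zero_start, PySem.List.slice_to _ (by norm_num)]
      norm_num
    simp only [List.map_nil, List.foldl_cons, List.foldl_nil, pvAStepGroup, hgrp]
    norm_num [PySem.List.len_eq, pvCats, PySem.List.pyGetD, PySem.List.pyGet?, PySem.List.pyIdx?, show Int.toNat 2 = 2 from rfl, show Int.toNat 3 = 3 from rfl, show Int.toNat 1 = 1 from rfl, show Int.toNat 0 = 0 from rfl]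
  | case3 a b =>
    rw [PySem.List.len_eq, show (([a, b] : List Int).length : Int) = 2 by simp,
        pvRange4_cons 2 (by norm_num), pvRange4_nil (2 - 4) (by norm_num)]
    have hgrp : PySem.List.slice ([a, b] : List Int) (some 0) (some (0 + 4)) = [a, b] := by
      rw [PySem.List.slice_zero_start, PySem.List.slice_to _ (by norm_num)]
      norm_num
    simp only [List.map_nil, List.foldl_cons, List.foldl_nil, pvAStepGroup, hgrp]
    norm_num [PySem.List.len_eq, pvCats, PySem.List.pyGetD, PySem.List.pyGet?, PySem.List.pyIdx?, show Int.toNat 2 = 2 from rfl, show Int.toNat 3 = 3 from rfl, show Int.toNat 1 = 1 from rfl, show Int.toNat 0 = 0 from rfl]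
  | case4 a b c =>
    rw [PySem.List.len_eq, show (([a, b, c] : List Int).length : Int) = 3 by simp,
        pvRange4_cons 3 (by norm_num), pvRange4_nil (3 - 4) (by norm_num)]
    have hgrp : PySem.List.slice ([a, b, c] : List Int) (some 0) (some (0 + 4)) = [a, b, c] := by
      rw [PySem.List.slice_zero_start, PySem.List.slice_to _ (by norm_num)]
      norm_num
    simp only [List.map_nil, List.foldl_cons, List.foldl_nil, pvAStepGroup, hgrp]
    norm_num [PySem.List.len_eq, pvCats, PySem.List.pyGetD, PySem.List.pyGet?, PySem.List.pyIdx?, show Int.toNat 2 = 2 from rfl, show Int.toNat 3 = 3 from rfl, show Int.toNat 1 = 1 from rfl, show Int.toNat 0 = 0 from rfl]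
  | case5 a b c d t ih =>
    rw [PySem.List.len_eq, pvRange4_cons _ (by simp; omega)]
    have hlen : ((a :: b :: c :: d :: t).length : Int) - 4 = (t.length : Int) := by
      simp; omega
    rw [hlen]
    simp only [List.foldl_cons, List.foldl_map]
    have hgrp : PySem.List.slice (a :: b :: c :: d :: t) (some 0) (some (0 + 4)) = [a, b, c, d] := by
      rw [PySem.List.slice_zero_start, PySem.List.slice_to _ (by norm_num)]
      norm_num [show Int.toNat 4 = 4 from rfl, List.take_succ_cons]
    have hstep0 : pvAStepGroup (a :: b :: c :: d :: t) (as, d1, d2, d3) 0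
        = (as ++ [a], d1 ++ [b - a], d2 ++ [(c - b) - (b - a)], d3 ++ [(d - b) - (b - a)]) := by
      simp only [pvAStepGroup, hgrp]
      norm_num [PySem.List.len_eq, PySem.List.pyGetD, PySem.List.pyGet?, PySem.List.pyIdx?, show Int.toNat 2 = 2 from rfl, show Int.toNat 3 = 3 from rfl, show Int.toNat 1 = 1 from rfl, show Int.toNat 0 = 0 from rfl]
    rw [hstep0]
    have hcong : ∀ (st : List Int × List Int × List Int × List Int) (g : Int),
        g ∈ PySem.List.pyRange 0 (t.length : Int) 4 →
        pvAStepGroup (a :: b :: c :: d :: t) st (g + 4) = pvAStepGroup t st g := by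
      intro st g hg
      have hg0 : 0 ≤ g := by
        rcases (PySem.List.mem_pyRange_iff_of_pos (by norm_num) g).mp hg with ⟨h, _, _⟩
        exact h
      unfold pvAStepGroup
      rw [pvSlice_shift a b c d t g hg0]
    rw [PySem.List.foldl_congr_mem _ _ _ _ (fun st g hg => hcong st g hg)]
    rw [show ((t.length : Int)) = PySem.List.len t from (PySem.List.len_eq t).symm]
    rw [ih]
    simp [pvCats, List.append_assoc]





lemma pvBStep0 (p1 p2 p3 m0 m1 m2 m3 c0 c1 c2 c3 x : Int) :
    pvBStep ⟨0, p1, p2, p3, m0, m1, m2, m3, c0, c1, c2, c3⟩ x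
      = ⟨1, x, p1, p2, pvAmax m0 [x], m1, m2, m3, c0 + 1, c1, c2, c3⟩ := by
  simp [pvBStep, pvAmax]

lemma pvBStep1 (p1 p2 p3 m0 m1 m2 m3 c0 c1 c2 c3 x : Int) :
    pvBStep ⟨1, p1, p2, p3, m0, m1, m2, m3, c0, c1, c2, c3⟩ x
      = ⟨2, x, p1, p2, m0, pvAmax m1 [x - p1], m2, m3, c0, c1 + 1, c2, c3⟩ := by
  simp [pvBStep, pvAmax]

lemma pvBStep2 (p1 p2 p3 m0 m1 m2 m3 c0 c1 c2 c3 x : Int) :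
    pvBStep ⟨2, p1, p2, p3, m0, m1, m2, m3, c0, c1, c2, c3⟩ x
      = ⟨3, x, p1, p2, m0, m1, pvAmax m2 [(x - p1) - (p1 - p2)], m3, c0, c1, c2 + 1, c3⟩ := by
  simp [pvBStep, pvAmax]

lemma pvBStep3 (p1 p2 p3 m0 m1 m2 m3 c0 c1 c2 c3 x : Int) :
    pvBStep ⟨3, p1, p2, p3, m0, m1, m2, m3, c0, c1, c2, c3⟩ x
      = ⟨0, x, p1, p2, m0, m1, m2, pvAmax m3 [(x - p2) - (p2 - p3)], c0, c1, c2, c3 + 1⟩ := by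
  simp [pvBStep, pvAmax]

lemma pvB_run (L : List Int) (p1 p2 p3 m0 m1 m2 m3 c0 c1 c2 c3 : Int) :
    ∃ j' q1 q2 q3,
      L.foldl pvBStep ⟨0, p1, p2, p3, m0, m1, m2, m3, c0, c1, c2, c3⟩
        = ⟨j', q1, q2, q3,
            pvAmax m0 (pvCats L).1, pvAmax m1 (pvCats L).2.1,
            pvAmax m2 (pvCats L).2.2.1, pvAmax m3 (pvCats L).2.2.2,
            c0 + (pvCats L).1.length, c1 + (pvCats L).2.1.length,
            c2 + (pvCats L).2.2.1.length, c3 + (pvCats L).2.2.2.length⟩ := by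
  induction L using pvCats.induct generalizing p1 p2 p3 m0 m1 m2 m3 c0 c1 c2 c3 with
  | case1 =>
    exact ⟨0, p1, p2, p3, by simp [pvCats, pvAmax]⟩
  | case2 a =>
    refine ⟨1, a, p1, p2, ?_⟩
    simp [List.foldl_cons, pvBStep0, pvCats, pvAmax]
  | case3 a b =>
    refine ⟨2, b, a, p1, ?_⟩
    simp only [List.foldl_cons, List.foldl_nil, pvBStep0, pvBStep1]
    simp [pvCats, pvAmax]
  | case4 a b c =>
    refine ⟨3, c, b, a, ?_⟩
    simp only [List.foldl_cons, List.foldl_nil, pvBStep0, pvBStep1, pvBStep2]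
    simp [pvCats, pvAmax]
  | case5 a b c d t ih =>
    simp only [List.foldl_cons, pvBStep0, pvBStep1, pvBStep2, pvBStep3]
    obtain ⟨j', q1, q2, q3, hIH⟩ := ih d c b (pvAmax m0 [a]) (pvAmax m1 [b - a])
      (pvAmax m2 [(c - b) - (b - a)]) (pvAmax m3 [(d - b) - (b - a)])
      (c0 + 1) (c1 + 1) (c2 + 1) (c3 + 1)
    refine ⟨j', q1, q2, q3, ?_⟩
    rw [hIH]
    have hmax : ∀ (m v : Int) (l : List Int), pvAmax (pvAmax m [v]) l = pvAmax m (v :: l) := by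
      intro m v l; rfl
    simp only [pvCats, hmax, PvB.mk.injEq]
    norm_num
    omega

lemma pvFold_slice {B : Type} (xs : List Int) (f : B → Int → B) (a b : Int) (ha : 0 ≤ a)
    (hab : a ≤ b) (hb : b ≤ (xs.length : Int)) (init : B) :
    (PySem.List.pyRange a b 1).foldl (fun st i => f st (PySem.List.pyGetD xs i 0)) init
      = (PySem.List.slice xs (some a) (some b)).foldl f init := by
  have hlen : ((xs.take b.toNat).length : Int) = b := by
    simp [List.length_take]; omega
  have h1 : (PySem.List.pyRange a b 1).foldl (fun st i => f st (PySem.List.pyGetD xs i 0)) init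
      = (PySem.List.pyRange a (PySem.List.len (xs.take b.toNat)) 1).foldl
          (fun st i => f st (PySem.List.pyGetD (xs.take b.toNat) i 0)) init := by
    rw [PySem.List.len_eq, hlen]
    apply PySem.List.foldl_congr_mem
    intro acc i hi
    rw [PySem.List.mem_pyRange_one] at hi
    rw [PySem.List.pyGetD_eq_getElem xs 0 (ha.trans hi.1) (by omega),
        PySem.List.pyGetD_eq_getElem (xs.take b.toNat) 0 (ha.trans hi.1) (by rw [hlen]; exact hi.2)]
    congr 1
    exact (List.getElem_take).symm
  rw [h1, PySem.List.foldl_pyRange_pyGetD _ _ _ _ ha,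
      PySem.List.slice_toNat _ ha (by omega)]
  rw [List.drop_take]

lemma pvRange_neg_nil (b s : Int) (hs : s < 0) (hb : 0 ≤ b) :
    PySem.List.pyRange 0 b s = [] := by
  simp only [PySem.List.pyRange, if_neg (show ¬ s = 0 by omega), if_neg (show ¬ 0 < s by omega),
    if_neg (show ¬ b < 0 by omega)]
  simp

lemma pvSeg_eq (column : List Int) (s total start : Int) (hs : 0 < s) (h0 : 0 ≤ start)
    (hlt : start < (column.length : Int)) :
    pvASeg column s total start = pvBSeg column s total start := by
  simp only [pvASeg, pvBSeg, PySem.List.len_eq]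
  have he : (if start + s > (column.length : Int) then (column.length : Int) else start + s)
      = min (start + s) (column.length : Int) := by
    split_ifs <;> omega
  rw [he]
  set e := min (start + s) (column.length : Int) with hedef
  have h1 : 0 ≤ e := by omega
  have h2 : start ≤ e := by omega
  have h3 : e ≤ (column.length : Int) := by omega
  rw [pvFold_slice column pvBStep start e h0 h2 h3]
  set seg := PySem.List.slice column (some start) (some e) with hseg
  have hA := pvA_inner seg [] [] [] []
  rw [PySem.List.len_eq] at hA
  rw [hA]
  obtain ⟨j', q1, q2, q3, hB⟩ := pvB_run seg 0 0 0 0 0 0 0 0 0 0 0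
  rw [hB]
  simp only [List.nil_append, List.foldl_cons, List.foldl_nil, zero_add]
  rw [pvCat_cost, pvCat_cost, pvCat_cost, pvCat_cost]

lemma pvSize_eq (column : List Int) (total s : Int) (hs : s ≠ 0) :
    pvASize column total s = pvBSize column total s := by
  unfold pvASize pvBSize
  by_cases hpos : 0 < s
  · rw [if_neg (by omega)]
    apply PySem.List.foldl_congr_mem
    intro acc start hmem
    obtain ⟨hge, hlt, -⟩ := (PySem.List.mem_pyRange_iff_of_pos hpos start).mp hmem
    exact pvSeg_eq column s acc start hpos hge (by rwa [PySem.List.len_eq] at hlt)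
  · rw [if_pos (by omega), PySem.List.len_eq,
        pvRange_neg_nil (column.length : Int) s (by omega) (by positivity)]
    rfl

-- ===== VERDICT (by name: the statement is the Claim_ definition above) =====
theorem compute_group_of_4_cost_spec : Claim_equal_compute_group_of_4_cost := by
  intro column seg_sizes _ hpre
  unfold Spec_compute_group_of_4_cost compute_group_of_4_cost compute_group_of_4_cost_alt
  exact PySem.List.foldl_congr_mem seg_sizes _ _ 0
    (fun acc s hs => pvSize_eq column acc s (hpre s hs))
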